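-- pv_equiv track=rewrite | github.com/RagingClown/MyPy | Exercises/EulerProject/e_5.py | smallest_d
-- ===== SOURCE A (Python) =====
-- import math
-- import math
--
-- def smallest_d(k):
--     prime_factors = [2]
--     i = 3
--     while i < k:
--         factor = i
--         for x in range(0, len(prime_factors)):
--             if i % prime_factors[x] == 0:
--                 factor //= prime_factors[x]
--         if factor > 1:
--             prime_factors.append(factor)
--         i += 1
--     return math.prod(prime_factors)
-- ===== SOURCE B (Python) =====
-- def smallest_d(k):
--     result = 2
--     for i in range(3, k):
--         p = 2
--         while p * p <= i and i % p != 0: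
--             p += 1
--         if p * p > i:
--             p = i  # i is prime
--         # p is the smallest prime factor of i; keep i only if it is a power of p
--         q = i
--         while q % p == 0:
--             q //= p
--         if q == 1:
--             result *= p
--     return result
-- ===== Notes on version B (the rewrite author's own statement) =====
-- stated objective: faster
-- what changed: Instead of maintaining a growing list of found factors and scanning all of it for every i, B tests each i independently by trial division: it contributes its smallest prime factor p exactly when i is a power of p, so the quadratic inner scan over the accumulated list disappears.
import Mathlib
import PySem

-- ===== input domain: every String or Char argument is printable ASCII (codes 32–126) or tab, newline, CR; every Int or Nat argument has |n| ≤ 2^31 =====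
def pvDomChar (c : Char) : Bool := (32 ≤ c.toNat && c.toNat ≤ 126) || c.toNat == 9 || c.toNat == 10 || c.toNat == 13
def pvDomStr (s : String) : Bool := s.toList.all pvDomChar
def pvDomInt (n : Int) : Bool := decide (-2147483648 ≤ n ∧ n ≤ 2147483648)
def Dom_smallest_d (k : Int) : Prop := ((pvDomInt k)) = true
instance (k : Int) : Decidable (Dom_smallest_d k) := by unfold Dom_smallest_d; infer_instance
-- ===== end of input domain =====

-- B replaces A's growing factor list and its inner scan by an independent
-- smallest-prime-factor / prime-power test for each i (objective: faster).

-- ===== PORT A =====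
def smallest_d (k : Int) : Int :=
  let pf := (List.range (k - 3).toNat).foldl
    (fun pf (j : Nat) =>
      let i : Int := 3 + (j : Int)
      let factor := pf.foldl (fun f p => if PySem.Int.mod i p = 0 then PySem.Int.floordiv f p else f) i
      if factor > 1 then pf ++ [factor] else pf) [2]
  pf.foldl (· * ·) 1

-- ===== PORT B =====
-- `while p * p <= i and i % p != 0: p += 1`
def bTrial (i p : Nat) : Nat :=
  if h : p * p ≤ i ∧ i % p ≠ 0 then bTrial i (p + 1) else p
termination_by i + 1 - p
decreasing_by
  have hp : p ≤ i := by
    rcases Nat.eq_zero_or_pos p with h0 | h0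
    · omega
    · exact le_trans (Nat.le_mul_of_pos_left p h0) h.1
  omega

-- `q = i` then `while q % p == 0: q //= p`; the 2 ≤ p / 0 < q guards only
-- make the recursion total (they hold on every call B makes).
def bStrip (p q : Nat) : Nat :=
  if h : 2 ≤ p ∧ 0 < q ∧ q % p = 0 then bStrip p (q / p) else q
termination_by q
decreasing_by exact Nat.div_lt_self h.2.1 h.1

-- smallest prime factor of i (the `p` B's loop ends with)
def bSpf (i : Nat) : Nat :=
  let p0 := bTrial i 2
  if i < p0 * p0 then i else p0

def smallest_d_alt (k : Int) : Int :=
  (((List.range (k - 3).toNat).foldl (fun res j =>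
      let i := 3 + j
      let p := bSpf i
      if bStrip p i = 1 then res * p else res) 2 : Nat) : Int)

-- ===== PRECONDITION & SPEC =====
def Spec_smallest_d (k : Int) (out : Int) : Prop := out = smallest_d_alt k
instance (k : Int) (out : Int) : Decidable (Spec_smallest_d k out) := by unfold Spec_smallest_d; infer_instance

-- ===== CLAIM (what is proved, stated in full; the proofs are below) =====
def Claim_equal_smallest_d : Prop := ∀ (k : Int), Dom_smallest_d k → Spec_smallest_d k (smallest_d k)

-- ===== LEMMAS AND PROOFS =====

-- Nat model of A's loop
def aStepN (pf : List Nat) (i : Nat) : List Nat :=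
  let f := pf.foldl (fun f p => if i % p = 0 then f / p else f) i
  if 1 < f then pf ++ [f] else pf

def aListN (n : Nat) : List Nat := (List.range n).foldl (fun pf j => aStepN pf (3 + j)) [2]

-- B's contribution of one i
def bC (i : Nat) : List Nat := if bStrip (bSpf i) i = 1 then [bSpf i] else []

def bContribs (n : Nat) : List Nat := (List.range n).flatMap (fun j => bC (3 + j))

-- contribution of j to the product A divides i by
def w (i j : Nat) : Nat := ((bC j).filter (fun q => i % q = 0)).prod

theorem bStrip_pow (p : Nat) (hp : 2 ≤ p) : ∀ a, bStrip p (p ^ a) = 1 := by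
  intro a
  induction a with
  | zero =>
    rw [pow_zero, bStrip]
    rw [dif_neg (by have : (1 : Nat) % p = 1 := Nat.one_mod_eq_one.mpr (by omega); omega)]
  | succ a ih =>
    have hpos : 0 < p ^ (a + 1) := pow_pos (by omega) _
    have hmod : p ^ (a + 1) % p = 0 := by rw [pow_succ]; exact Nat.mul_mod_left _ _
    rw [bStrip, dif_pos ⟨hp, hpos, hmod⟩]
    have hdiv : p ^ (a + 1) / p = p ^ a := by
      rw [pow_succ]; exact Nat.mul_div_cancel _ (by omega)
    rw [hdiv]; exact ih

theorem bStrip_spec (p : Nat) (hp : 2 ≤ p) :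
    ∀ q, 0 < q → ∃ e, q = p ^ e * bStrip p q ∧ ¬ p ∣ bStrip p q := by
  intro q
  induction q using Nat.strong_induction_on with
  | _ q ih =>
    intro hq
    rw [bStrip]
    by_cases h : q % p = 0
    · rw [dif_pos ⟨hp, hq, h⟩]
      have hdvd : p ∣ q := Nat.dvd_of_mod_eq_zero h
      have hlt : q / p < q := Nat.div_lt_self hq hp
      have hpos : 0 < q / p := Nat.div_pos (Nat.le_of_dvd hq hdvd) (by omega)
      obtain ⟨e, he, hnd⟩ := ih (q / p) hlt hpos
      refine ⟨e + 1, ?_, hnd⟩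
      calc q = p * (q / p) := (Nat.mul_div_cancel' hdvd).symm
        _ = p * (p ^ e * bStrip p (q / p)) := by rw [← he]
        _ = p ^ (e + 1) * bStrip p (q / p) := by ring
    · rw [dif_neg (by tauto)]
      exact ⟨0, by simp, fun hd => h (Nat.mod_eq_zero_of_dvd hd)⟩

theorem bStrip_eq_one_iff (i : Nat) (hi : 2 ≤ i) :
    bStrip (Nat.minFac i) i = 1 ↔ IsPrimePow i := by
  have hp : (Nat.minFac i).Prime := Nat.minFac_prime (by omega)
  have hp2 : 2 ≤ i.minFac := hp.two_le
  constructor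
  · intro h
    obtain ⟨e, he, -⟩ := bStrip_spec i.minFac hp2 i (by omega)
    rw [h, mul_one] at he
    have he1 : 1 ≤ e := by
      rcases Nat.eq_zero_or_pos e with h0 | h0
      · rw [h0, pow_zero] at he; omega
      · exact h0
    exact ⟨i.minFac, e, hp.prime, by omega, he.symm⟩
  · rintro ⟨q, e, hq, he, rfl⟩
    have hqp : Nat.Prime q := hq.nat_prime
    rw [Nat.Prime.pow_minFac hqp (by omega)]
    exact bStrip_pow q hqp.two_le e

theorem bTrial_spec (i : Nat) : ∀ (p : Nat), 2 ≤ p → (∀ r, 2 ≤ r → r < p → ¬ r ∣ i) →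
    2 ≤ bTrial i p ∧ (∀ r, 2 ≤ r → r < bTrial i p → ¬ r ∣ i) ∧
      (i < bTrial i p * bTrial i p ∨ bTrial i p ∣ i) := by
  intro p
  induction p using bTrial.induct i with
  | case1 p h ih =>
    intro hp hnd
    rw [bTrial, dif_pos h]
    refine ih (by omega) ?_
    intro r hr2 hrp
    rcases Nat.lt_or_ge r p with hlt | hge
    · exact hnd r hr2 hlt
    · have hr : r = p := by omega
      subst hr
      intro hd
      exact h.2 (Nat.mod_eq_zero_of_dvd hd)
  | case2 p h =>
    intro hp hnd
    rw [bTrial, dif_neg h]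
    refine ⟨hp, hnd, ?_⟩
    by_cases hle : p * p ≤ i
    · have hm : i % p = 0 := by tauto
      exact Or.inr (Nat.dvd_of_mod_eq_zero hm)
    · exact Or.inl (by omega)

theorem bSpf_eq_minFac (i : Nat) (hi : 2 ≤ i) : bSpf i = Nat.minFac i := by
  obtain ⟨h2, hnd, hor⟩ := bTrial_spec i 2 le_rfl (by intro r h1 h2; omega)
  set p0 := bTrial i 2 with hp0
  unfold bSpf
  rw [← hp0]
  by_cases hlt : i < p0 * p0
  · rw [if_pos hlt]
    have hd2 : 2 ≤ i.minFac := (Nat.minFac_prime (by omega : i ≠ 1)).two_le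
    have hdd : i.minFac ∣ i := Nat.minFac_dvd i
    by_cases hdi : i.minFac = i
    · omega
    · exfalso
      set d := i.minFac with hd
      set c := i / d with hc
      have hcd : d * c = i := Nat.mul_div_cancel' hdd
      have hcdvd : c ∣ i := Nat.div_dvd_of_dvd hdd
      have hc1 : c ≠ 1 := by intro h1; rw [h1, mul_one] at hcd; exact hdi hcd
      have hc0 : 0 < c := by
        rcases Nat.eq_zero_or_pos c with h0 | h0
        · rw [h0, mul_zero] at hcd; omega
        · exact h0
      have hdc : d ≤ c := Nat.minFac_le_of_dvd (by omega) hcdvd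
      have hdd2 : d * d ≤ i := by calc d * d ≤ d * c := Nat.mul_le_mul_left d hdc
                                      _ = i := hcd
      have hdp0 : d < p0 := by nlinarith
      exact hnd d hd2 hdp0 hdd
  · rw [if_neg hlt]
    have hdvd : p0 ∣ i := by
      rcases hor with h | h
      · omega
      · exact h
    have h1 : i.minFac ≤ p0 := Nat.minFac_le_of_dvd h2 hdvd
    have h2' : ¬ i.minFac < p0 := fun hc =>
      hnd i.minFac (Nat.minFac_prime (by omega : i ≠ 1)).two_le hc (Nat.minFac_dvd i)
    omega

theorem foldDiv (i : Nat) : ∀ (L : List Nat) (f : Nat),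
    L.foldl (fun f q => if i % q = 0 then f / q else f) f
      = f / (L.filter (fun q => i % q = 0)).prod := by
  intro L
  induction L with
  | nil => intro f; simp
  | cons q L ih =>
    intro f
    by_cases h : i % q = 0
    · simp [h, ih, Nat.div_div_eq_div_mul]
    · simp [h, ih]

theorem bC_two : bC 2 = [2] := by
  have h1 : bTrial 2 2 = 2 := by rw [bTrial, dif_neg (by omega)]
  have h2 : bSpf 2 = 2 := by simp [bSpf, h1]
  have h3 : bStrip 2 2 = 1 := by
    rw [bStrip, dif_pos ⟨le_rfl, by omega, by norm_num⟩]
    have h22 : (2 : Nat) / 2 = 1 := by norm_num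
    rw [h22, bStrip, dif_neg (by omega)]
  unfold bC
  rw [h2, h3, if_pos rfl]

theorem pp_repr (j : Nat) (h : IsPrimePow j) :
    j.minFac.Prime ∧ ∃ e, 1 ≤ e ∧ j = j.minFac ^ e := by
  obtain ⟨q, e, hq, he, rfl⟩ := h
  have hqp := hq.nat_prime
  rw [Nat.Prime.pow_minFac hqp (by omega)]
  exact ⟨hqp, e, he, rfl⟩

theorem w_of_pp (i j : Nat) (h : IsPrimePow j) :
    w i j = if i % j.minFac = 0 then j.minFac else 1 := by
  have hj : 2 ≤ j := h.two_le
  unfold w bC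
  rw [bSpf_eq_minFac j hj, if_pos ((bStrip_eq_one_iff j hj).mpr h)]
  by_cases hd : i % j.minFac = 0
  · simp [hd]
  · simp [hd]

theorem w_of_not_pp (i j : Nat) (hj : 2 ≤ j) (h : ¬ IsPrimePow j) : w i j = 1 := by
  unfold w bC
  rw [bSpf_eq_minFac j hj, if_neg (fun hc => h ((bStrip_eq_one_iff j hj).mp hc))]
  simp

theorem one_le_w (i j : Nat) (hj : 2 ≤ j) : 1 ≤ w i j := by
  by_cases h : IsPrimePow j
  · rw [w_of_pp i j h]
    split_ifs
    · exact Nat.minFac_pos j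
    · exact le_rfl
  · rw [w_of_not_pp i j hj h]

theorem P_eq (i : Nat) : ∀ n, ((2 :: bContribs n).filter (fun q => i % q = 0)).prod
    = ∏ j ∈ Finset.Ico 2 (n + 3), w i j := by
  intro n
  induction n with
  | zero =>
    have hb : bContribs 0 = [] := by simp [bContribs]
    rw [hb]
    have hico : Finset.Ico 2 3 = {2} := by decide
    rw [hico, Finset.prod_singleton]
    unfold w
    rw [bC_two]
  | succ n ih =>
    have hc : bContribs (n + 1) = bContribs n ++ bC (3 + n) := by
      unfold bContribs
      rw [List.range_succ, List.flatMap_append]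
      simp
    rw [hc, show (2 :: (bContribs n ++ bC (3 + n))) = (2 :: bContribs n) ++ bC (3 + n) from rfl,
      List.filter_append, List.prod_append, ih]
    conv_rhs => rw [show n + 1 + 3 = (n + 3) + 1 from rfl,
      Finset.prod_Ico_succ_top (show 2 ≤ n + 3 by omega)]
    rw [Nat.add_comm 3 n]
    rfl

theorem P_pp (p a : Nat) (hp : p.Prime) (ha : 1 ≤ a) :
    ∏ j ∈ Finset.Ico 2 (p ^ a), w (p ^ a) j = p ^ (a - 1) := by
  have hp2 := hp.two_le
  have himg : (Finset.Ico 1 a).image (p ^ ·) ⊆ Finset.Ico 2 (p ^ a) := by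
    intro j hj
    simp only [Finset.mem_image, Finset.mem_Ico] at hj ⊢
    obtain ⟨b, ⟨hb1, hba⟩, rfl⟩ := hj
    refine ⟨?_, Nat.pow_lt_pow_right (by omega) hba⟩
    calc 2 ≤ p := hp2
      _ = p ^ 1 := (pow_one p).symm
      _ ≤ p ^ b := Nat.pow_le_pow_right (by omega) hb1
  have hoff : ∀ j ∈ Finset.Ico 2 (p ^ a), j ∉ (Finset.Ico 1 a).image (p ^ ·) → w (p ^ a) j = 1 := by
    intro j hj hnot
    simp only [Finset.mem_Ico] at hj
    by_cases hpp : IsPrimePow j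
    · rw [w_of_pp _ _ hpp]
      by_cases hd : (p ^ a) % j.minFac = 0
      · exfalso
        obtain ⟨hjp, e, he1, hrep⟩ := pp_repr j hpp
        have hdvd : j.minFac ∣ p ^ a := Nat.dvd_of_mod_eq_zero hd
        have hqp : j.minFac = p := by
          have := hjp.dvd_of_dvd_pow hdvd
          exact (Nat.prime_dvd_prime_iff_eq hjp hp).mp this
        rw [hqp] at hrep
        have hlt : e < a := by
          by_contra hge
          have : p ^ a ≤ p ^ e := Nat.pow_le_pow_right (by omega) (by omega)
          omega
        exact hnot (Finset.mem_image.mpr ⟨e, Finset.mem_Ico.mpr ⟨he1, hlt⟩, hrep.symm⟩)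
      · rw [if_neg hd]
    · exact w_of_not_pp _ _ (by omega) hpp
  rw [← Finset.prod_subset himg hoff]
  rw [Finset.prod_image (fun x _ y _ h => Nat.pow_right_injective hp2 h)]
  have hval : ∀ b ∈ Finset.Ico 1 a, w (p ^ a) (p ^ b) = p := by
    intro b hb
    simp only [Finset.mem_Ico] at hb
    have hppb : IsPrimePow (p ^ b) := ⟨p, b, hp.prime, by omega, rfl⟩
    rw [w_of_pp _ _ hppb, Nat.Prime.pow_minFac hp (by omega)]
    rw [if_pos (Nat.mod_eq_zero_of_dvd (dvd_pow_self p (by omega)))]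
  rw [Finset.prod_congr rfl hval, Finset.prod_const, Nat.card_Ico]

theorem P_big (i : Nat) (h3 : 3 ≤ i) (hnp : ¬ IsPrimePow i) :
    i < ∏ j ∈ Finset.Ico 2 i, w i j := by
  have hi0 : i ≠ 0 := by omega
  set p := i.minFac with hpdef
  have hpp : p.Prime := Nat.minFac_prime (by omega)
  have hp2 := hpp.two_le
  have hpmem : p ∈ i.primeFactors :=
    Nat.mem_primeFactors.mpr ⟨hpp, Nat.minFac_dvd i, hi0⟩
  set e : Nat → Nat := fun r => i.factorization r + (if r = p then 1 else 0) with hedef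
  -- every admissible prime power is below i
  have hkey : ∀ r ∈ i.primeFactors, r ^ e r < i := by
    intro r hr
    obtain ⟨hrp, hrd, -⟩ := Nat.mem_primeFactors.mp hr
    have hra : 0 < i.factorization r := hrp.factorization_pos_of_dvd hi0 hrd
    by_cases hrpeq : r = p
    · have her : e r = i.factorization r + 1 := by simp [hedef, hrpeq]
      set a := i.factorization r with hadef
      set m := i / r ^ a with hmdef
      have hmul : r ^ a * m = i := Nat.ordProj_mul_ordCompl_eq_self i r
      have hnd : ¬ r ∣ m := Nat.not_dvd_ordCompl hrp hi0
      have hm1 : m ≠ 1 := by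
        intro h1
        rw [h1, mul_one] at hmul
        exact hnp ⟨r, a, hrp.prime, hra, hmul⟩
      have hm0 : m ≠ 0 := by
        intro h0
        rw [h0, mul_zero] at hmul
        omega
      have hmdvd : m ∣ i := ⟨r ^ a, by rw [mul_comm]; exact hmul.symm⟩
      have hmf : m.minFac ∣ i := (Nat.minFac_dvd m).trans hmdvd
      have hle : p ≤ m.minFac :=
        Nat.minFac_le_of_dvd (Nat.minFac_prime hm1).two_le hmf
      have hne : r ≠ m.minFac := by
        intro hq
        exact hnd (hq ▸ Nat.minFac_dvd m)
      have hpm : r < m := by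
        have h1 : m.minFac ≤ m := Nat.minFac_le (Nat.pos_of_ne_zero hm0)
        omega
      have hpow : 0 < r ^ a := pow_pos (by omega) a
      calc r ^ e r = r ^ a * r := by rw [her, pow_succ]
        _ < r ^ a * m := (Nat.mul_lt_mul_left hpow).mpr hpm
        _ = i := hmul
    · have her : e r = i.factorization r := by simp [hedef, hrpeq]
      rw [her]
      have hdvd : r ^ i.factorization r ∣ i := Nat.ordProj_dvd i r
      have hne : r ^ i.factorization r ≠ i := by
        intro heq
        exact hnp ⟨r, i.factorization r, hrp.prime, hra, heq⟩
      exact lt_of_le_of_ne (Nat.le_of_dvd (by omega) hdvd) hne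
  set S := i.primeFactors.biUnion (fun r => (Finset.Icc 1 (e r)).image (r ^ ·)) with hSdef
  have hS : S ⊆ Finset.Ico 2 i := by
    intro j hj
    simp only [hSdef, Finset.mem_biUnion, Finset.mem_image, Finset.mem_Icc] at hj
    obtain ⟨r, hr, c, ⟨hc1, hc2⟩, rfl⟩ := hj
    obtain ⟨hrp, -, -⟩ := Nat.mem_primeFactors.mp hr
    simp only [Finset.mem_Ico]
    constructor
    · calc 2 ≤ r := hrp.two_le
        _ = r ^ 1 := (pow_one r).symm
        _ ≤ r ^ c := Nat.pow_le_pow_right (by have := hrp.two_le; omega) hc1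
    · calc r ^ c ≤ r ^ e r := Nat.pow_le_pow_right (by have := hrp.two_le; omega) hc2
        _ < i := hkey r hr
  have hdisj : (i.primeFactors : Set Nat).PairwiseDisjoint
      (fun r => (Finset.Icc 1 (e r)).image (r ^ ·)) := by
    intro r hr r' hr' hne
    simp only [Finset.disjoint_left]
    intro j hj hj'
    simp only [Finset.mem_image, Finset.mem_Icc] at hj hj'
    obtain ⟨c, ⟨hc1, -⟩, rfl⟩ := hj
    obtain ⟨c', ⟨hc1', -⟩, heq⟩ := hj'
    simp only [Finset.mem_coe] at hr hr'
    obtain ⟨hrp, -, -⟩ := Nat.mem_primeFactors.mp hr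
    obtain ⟨hrp', -, -⟩ := Nat.mem_primeFactors.mp hr'
    apply hne
    have : r' ∣ r ^ c := heq ▸ dvd_pow_self r' (by omega)
    exact ((Nat.prime_dvd_prime_iff_eq hrp' hrp).mp (hrp'.dvd_of_dvd_pow this)).symm
  have hprodS : ∏ j ∈ S, w i j = i * p := by
    rw [hSdef, Finset.prod_biUnion hdisj]
    have hinner : ∀ r ∈ i.primeFactors,
        (∏ j ∈ (Finset.Icc 1 (e r)).image (r ^ ·), w i j) = r ^ e r := by
      intro r hr
      obtain ⟨hrp, hrd, -⟩ := Nat.mem_primeFactors.mp hr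
      rw [Finset.prod_image (fun x _ y _ h => Nat.pow_right_injective hrp.two_le h)]
      have hval : ∀ c ∈ Finset.Icc 1 (e r), w i (r ^ c) = r := by
        intro c hc
        simp only [Finset.mem_Icc] at hc
        have hppc : IsPrimePow (r ^ c) := ⟨r, c, hrp.prime, by omega, rfl⟩
        rw [w_of_pp _ _ hppc, Nat.Prime.pow_minFac hrp (by omega),
          if_pos (Nat.mod_eq_zero_of_dvd hrd)]
      rw [Finset.prod_congr rfl hval, Finset.prod_const, Nat.card_Icc]
      simp
    rw [Finset.prod_congr rfl hinner]
    have hsplit : ∀ r ∈ i.primeFactors,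
        r ^ e r = r ^ i.factorization r * (if r = p then r else 1) := by
      intro r hr
      by_cases h : r = p
      · simp [hedef, h, pow_succ]
      · simp [hedef, h]
    rw [Finset.prod_congr rfl hsplit, Finset.prod_mul_distrib,
      Finset.prod_ite_eq' i.primeFactors p (fun r => r), if_pos hpmem]
    congr 1
    have hfact := Nat.prod_factorization_pow_eq_self hi0
    rw [Finsupp.prod] at hfact
    rw [← Nat.support_factorization]
    exact hfact
  have hmono : ∏ j ∈ S, w i j ≤ ∏ j ∈ Finset.Ico 2 i, w i j := by
    apply Finset.prod_le_prod_of_subset_of_one_le' hS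
    intro j hj _
    exact one_le_w i j (by simp only [Finset.mem_Ico] at hj; omega)
  calc i < i * p := by nlinarith
    _ = ∏ j ∈ S, w i j := hprodS.symm
    _ ≤ _ := hmono

theorem aList_eq (n : Nat) : aListN n = 2 :: bContribs n := by
  induction n with
  | zero => simp [aListN, bContribs]
  | succ n ih =>
    have hstep : aListN (n + 1) = aStepN (aListN n) (3 + n) := by
      unfold aListN
      rw [List.range_succ, List.foldl_append]
      simp
    have hc : bContribs (n + 1) = bContribs n ++ bC (3 + n) := by
      unfold bContribs
      rw [List.range_succ, List.flatMap_append]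
      simp
    rw [hstep, ih, hc]
    unfold aStepN
    simp only []
    rw [foldDiv]
    have hP : ((2 :: bContribs n).filter (fun q => (3 + n) % q = 0)).prod
        = ∏ j ∈ Finset.Ico 2 (3 + n), w (3 + n) j := by
      rw [P_eq (3 + n) n, Nat.add_comm 3 n]
    rw [hP]
    have h2i : (2 : Nat) ≤ 3 + n := by omega
    by_cases hpp : IsPrimePow (3 + n)
    · obtain ⟨hqp, a, ha1, hrep⟩ := pp_repr (3 + n) hpp
      set q := (3 + n).minFac with hq
      have hPval : (∏ j ∈ Finset.Ico 2 (3 + n), w (3 + n) j) = q ^ (a - 1) := by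
        conv_lhs => rw [hrep]
        exact P_pp q a hqp ha1
      have hfval : (3 + n) / q ^ (a - 1) = q := by
        conv_lhs => rw [hrep]
        rw [Nat.pow_div (by omega) (by have := hqp.two_le; omega)]
        have : a - (a - 1) = 1 := by omega
        rw [this, pow_one]
      rw [hPval, hfval, if_pos hqp.one_lt]
      have hbC : bC (3 + n) = [q] := by
        unfold bC
        rw [bSpf_eq_minFac (3 + n) h2i, if_pos ((bStrip_eq_one_iff (3 + n) h2i).mpr hpp)]
      rw [hbC]
      rfl
    · have hPbig := P_big (3 + n) (by omega) hpp
      have hzero : (3 + n) / (∏ j ∈ Finset.Ico 2 (3 + n), w (3 + n) j) = 0 :=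
        Nat.div_eq_of_lt hPbig
      rw [hzero, if_neg (by omega)]
      have hbC : bC (3 + n) = [] := by
        unfold bC
        rw [bSpf_eq_minFac (3 + n) h2i,
          if_neg (fun hc => hpp ((bStrip_eq_one_iff (3 + n) h2i).mp hc))]
      rw [hbC, List.append_nil]

theorem prodA (n : Nat) : (aListN n).foldl (· * ·) 1 = 2 * (bContribs n).prod := by
  rw [aList_eq, ← List.prod_eq_foldl, List.prod_cons]

theorem prodB (n : Nat) :
    (List.range n).foldl (fun res j =>
      let i := 3 + j
      let p := bSpf i
      if bStrip p i = 1 then res * p else res) 2 = 2 * (bContribs n).prod := by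
  induction n with
  | zero => simp [bContribs]
  | succ n ih =>
    rw [List.range_succ, List.foldl_append, ih]
    simp only [List.foldl_cons, List.foldl_nil, bContribs, List.range_succ, List.flatMap_append,
      List.flatMap_cons, List.flatMap_nil, List.append_nil, List.prod_append]
    by_cases h : bStrip (bSpf (3 + n)) (3 + n) = 1
    · simp [h, bC, mul_assoc]
    · simp [h, bC]

theorem innerBridge (iN : Nat) (pfN : List Nat) : ∀ (fN : Nat),
    (pfN.map (Nat.cast)).foldl
      (fun f p => if PySem.Int.mod (iN : Int) p = 0 then PySem.Int.floordiv f p else f) (fN : Int)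
    = ((pfN.foldl (fun f p => if iN % p = 0 then f / p else f) fN : Nat) : Int) := by
  induction pfN with
  | nil => intro fN; simp
  | cons q L ih =>
    intro fN
    simp only [List.map_cons, List.foldl_cons, PySem.Int.mod_natCast]
    by_cases h : iN % q = 0
    · rw [if_pos (by exact_mod_cast h), if_pos h, PySem.Int.floordiv_natCast, ih]
    · rw [if_neg (by exact_mod_cast h), if_neg h, ih]

theorem listBridge (n : Nat) :
    (List.range n).foldl
      (fun pf (j : Nat) =>
        let i : Int := 3 + (j : Int)
        let factor := pf.foldl (fun f p => if PySem.Int.mod i p = 0 then PySem.Int.floordiv f p else f) i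
        if factor > 1 then pf ++ [factor] else pf) [2]
    = (aListN n).map (Nat.cast) := by
  induction n with
  | zero => simp [aListN]
  | succ n ih =>
    rw [List.range_succ, List.foldl_append, ih]
    unfold aListN
    rw [List.range_succ, List.foldl_append]
    simp only [List.foldl_cons, List.foldl_nil]
    show _ = (aStepN ((List.range n).foldl (fun pf j => aStepN pf (3 + j)) [2]) (3 + n)).map Nat.cast
    set pfN := (List.range n).foldl (fun pf j => aStepN pf (3 + j)) [2] with hpfN
    have h3n : (3 : Int) + (n : Int) = ((3 + n : Nat) : Int) := by push_cast; ring
    rw [h3n, innerBridge (3 + n) pfN]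
    unfold aStepN
    set fN := pfN.foldl (fun f p => if (3 + n) % p = 0 then f / p else f) (3 + n) with hfN
    by_cases h : 1 < fN
    · rw [if_pos (by exact_mod_cast h), if_pos h, List.map_append]
      simp
    · rw [if_neg (by exact_mod_cast h), if_neg h]

theorem prodBridge (L : List Nat) : ∀ (a : Nat),
    (L.map (Nat.cast)).foldl (· * ·) (a : Int) = ((L.foldl (· * ·) a : Nat) : Int) := by
  induction L with
  | nil => intro a; simp
  | cons q L ih =>
    intro a
    simp only [List.map_cons, List.foldl_cons]
    rw [← Nat.cast_mul, ih]

theorem intNat_bridge (k : Int) :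
    smallest_d k = (((aListN (k - 3).toNat).foldl (· * ·) 1 : Nat) : Int) := by
  unfold smallest_d
  rw [listBridge]
  exact prodBridge _ 1

-- ===== VERDICT (by name: the statement is the Claim_ definition above) =====
theorem smallest_d_spec : Claim_equal_smallest_d := by
  intro k _
  unfold Spec_smallest_d smallest_d_alt
  rw [intNat_bridge, prodA, prodB]
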